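-- pv_equiv track=rewrite | github.com/sfirdous/Clarifi | backend/parsers/sbi_parser.py | clean_sbi_entries
-- ===== SOURCE A (Python) =====
-- def clean_sbi_entries(entries):
--     cleaned_entries = []
--     i = 0
--     while i < len(entries):
--         current = entries[i]
--
--         if i + 1 < len(entries):
--             next_entry = entries[i + 1]
--
--             # Case 1: credit entry followed by debit-only
--             if (
--                 current.get("Debit", "").strip() == "" and
--                 current.get("Credit", "").strip() != "" and
--                 next_entry.get("Debit", "").strip() == "-" and
--                 next_entry.get("Credit", "").strip() == ""
--             ):
--                 merged = {
--                     "Txn Date": current.get("Txn Date") or next_entry.get("Txn Date", ""),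
--                     "Value Date": current.get("Value Date") or next_entry.get("Value Date", ""),
--                     "Description": current.get("Description", "") + " " + next_entry.get("Description", ""),
--                     "Debit": "-",
--                     "Credit": current["Credit"],
--                     "Balance": next_entry.get("Balance", "")
--                 }
--                 cleaned_entries.append(merged)
--                 i += 2
--                 continue
--
--             # Case 2: debit entry followed by credit-only
--             elif (
--                 current.get("Debit", "").strip() == "-" and
--                 current.get("Credit", "").strip() == "" and
--                 next_entry.get("Debit", "").strip() == "" and
--                 next_entry.get("Credit", "").strip() != ""
--             ):
--                 merged = {
--                     "Txn Date": current.get("Txn Date") or next_entry.get("Txn Date", ""),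
--                     "Value Date": current.get("Value Date") or next_entry.get("Value Date", ""),
--                     "Description": current.get("Description", "") + " " + next_entry.get("Description", ""),
--                     "Debit": "-",
--                     "Credit": next_entry["Credit"],
--                     "Balance": next_entry.get("Balance", "")
--                 }
--                 cleaned_entries.append(merged)
--                 i += 2
--                 continue
--
--         # Default — keep row as is
--         cleaned_entries.append(current)
--         i += 1
--
--     return cleaned_entries
-- ===== SOURCE B (Python) =====
-- def _pat(a, b):
--     """Classify pair (a, b): 1 = credit row + debit-only row, 2 = debit row + credit-only row, 0 = no merge."""
--     ad = a.get("Debit", "").strip()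
--     ac = a.get("Credit", "").strip()
--     bd = b.get("Debit", "").strip()
--     bc = b.get("Credit", "").strip()
--     if ad == "" and ac != "" and bd == "-" and bc == "":
--         return 1
--     if ad == "-" and ac == "" and bd == "" and bc != "":
--         return 2
--     return 0
--
--
-- def _merge(a, b, p):
--     return {
--         "Txn Date": a.get("Txn Date") or b.get("Txn Date", ""),
--         "Value Date": a.get("Value Date") or b.get("Value Date", ""),
--         "Description": a.get("Description", "") + " " + b.get("Description", ""),
--         "Debit": "-",
--         "Credit": a["Credit"] if p == 1 else b["Credit"],
--         "Balance": b.get("Balance", ""),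
--     }
--
--
-- def clean_sbi_entries(entries):
--     # stage 1: boolean mask of greedy merge-start positions
--     # (index i starts a merge iff the pair matches and i-1 does not start one)
--     start = []
--     for i in range(len(entries) - 1):
--         start.append(_pat(entries[i], entries[i + 1]) != 0
--                      and not (i > 0 and start[i - 1]))
--     start.append(False)  # the last row never starts a merge
--     # stage 2: emit one output row per index not consumed by the previous index
--     out = []
--     for i, e in enumerate(entries):
--         if start[i]:
--             out.append(_merge(e, entries[i + 1], _pat(e, entries[i + 1])))
--         elif not (i > 0 and start[i - 1]):
--             out.append(e)
--     return out
-- ===== Notes on version B (the rewrite author's own statement) =====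
-- stated objective: alternative
-- what changed: A's single index-based loop with i+1 lookahead and i+=2 skipping is replaced by two staged passes: first a boolean mask of greedy merge-start positions (start[i] = pair matches and start[i-1] is false), then a per-index emit pass that outputs the merged pair, skips a consumed row, or keeps the row.
import Mathlib
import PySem

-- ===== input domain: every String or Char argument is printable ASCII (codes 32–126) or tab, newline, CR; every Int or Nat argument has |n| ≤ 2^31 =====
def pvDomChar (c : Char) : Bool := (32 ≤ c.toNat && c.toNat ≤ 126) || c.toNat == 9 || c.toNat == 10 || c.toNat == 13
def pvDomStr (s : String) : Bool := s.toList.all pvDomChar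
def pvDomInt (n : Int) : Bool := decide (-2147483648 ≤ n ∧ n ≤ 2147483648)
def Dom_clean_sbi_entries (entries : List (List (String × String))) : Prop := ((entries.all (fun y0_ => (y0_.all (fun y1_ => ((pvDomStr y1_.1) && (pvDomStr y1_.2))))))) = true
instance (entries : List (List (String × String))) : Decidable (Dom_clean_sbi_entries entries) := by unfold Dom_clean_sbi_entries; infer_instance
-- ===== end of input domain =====

-- B replaces A's single index-plus-lookahead loop by two staged passes: a boolean mask of greedy
-- merge-start positions, then a per-index emit pass. Objective: alternative decomposition, same O(n) cost.

-- shared dict primitives (dict.get with/without default) and Python `or` truthiness on an optional string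
def pvGetD (d : List (String × String)) (k dflt : String) : String :=
  (PySem.Dict.mk d).getD k dflt

def pvGet? (d : List (String × String)) (k : String) : Option String :=
  (PySem.Dict.mk d).get? k

-- Python `x or y` where x : Optional[str] (None and "" are falsy)
def pvOrStr (x : Option String) (y : String) : String :=
  match x with
  | some s => if s = "" then y else s
  | none => y

-- ===== PORT A =====
-- literal port of A's while loop: recursion on the suffix entries[i:] with lookahead on the next element
-- (i+=1 = recurse on the tail, i+=2 = recurse on the tail's tail); `current["Credit"]` / `next_entry["Credit"]`
-- are ported as pvGetD … "" — the guard `strip(get("Credit","")) ≠ ""` makes the key present there, so the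
-- default is never taken and no KeyError occurs (A is total).
def clean_sbi_entries (entries : List (List (String × String))) : List (List (String × String)) :=
  match entries with
  | [] => []
  | [current] => [current]
  | current :: next_entry :: rest =>
    -- Case 1: credit entry followed by debit-only
    if PySem.Str.strip (pvGetD current "Debit" "") = "" ∧
       PySem.Str.strip (pvGetD current "Credit" "") ≠ "" ∧
       PySem.Str.strip (pvGetD next_entry "Debit" "") = "-" ∧
       PySem.Str.strip (pvGetD next_entry "Credit" "") = "" then
      [("Txn Date", pvOrStr (pvGet? current "Txn Date") (pvGetD next_entry "Txn Date" "")),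
       ("Value Date", pvOrStr (pvGet? current "Value Date") (pvGetD next_entry "Value Date" "")),
       ("Description", pvGetD current "Description" "" ++ " " ++ pvGetD next_entry "Description" ""),
       ("Debit", "-"),
       ("Credit", pvGetD current "Credit" ""),
       ("Balance", pvGetD next_entry "Balance" "")] :: clean_sbi_entries rest
    -- Case 2: debit entry followed by credit-only
    else if PySem.Str.strip (pvGetD current "Debit" "") = "-" ∧
            PySem.Str.strip (pvGetD current "Credit" "") = "" ∧
            PySem.Str.strip (pvGetD next_entry "Debit" "") = "" ∧
            PySem.Str.strip (pvGetD next_entry "Credit" "") ≠ "" then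
      [("Txn Date", pvOrStr (pvGet? current "Txn Date") (pvGetD next_entry "Txn Date" "")),
       ("Value Date", pvOrStr (pvGet? current "Value Date") (pvGetD next_entry "Value Date" "")),
       ("Description", pvGetD current "Description" "" ++ " " ++ pvGetD next_entry "Description" ""),
       ("Debit", "-"),
       ("Credit", pvGetD next_entry "Credit" ""),
       ("Balance", pvGetD next_entry "Balance" "")] :: clean_sbi_entries rest
    -- Default — keep row as is
    else
      current :: clean_sbi_entries (next_entry :: rest)

-- ===== PORT B =====
-- Source B's _pat: classify a pair of rows (1 / 2 = the two merge patterns, 0 = no merge)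
def pvPat (a b : List (String × String)) : Nat :=
  if PySem.Str.strip (pvGetD a "Debit" "") = "" ∧
     PySem.Str.strip (pvGetD a "Credit" "") ≠ "" ∧
     PySem.Str.strip (pvGetD b "Debit" "") = "-" ∧
     PySem.Str.strip (pvGetD b "Credit" "") = "" then 1
  else if PySem.Str.strip (pvGetD a "Debit" "") = "-" ∧
          PySem.Str.strip (pvGetD a "Credit" "") = "" ∧
          PySem.Str.strip (pvGetD b "Debit" "") = "" ∧
          PySem.Str.strip (pvGetD b "Credit" "") ≠ "" then 2
  else 0

-- Source B's _merge: the merged row for pattern p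
def pvMerge (a b : List (String × String)) (p : Nat) : List (String × String) :=
  [("Txn Date", pvOrStr (pvGet? a "Txn Date") (pvGetD b "Txn Date" "")),
   ("Value Date", pvOrStr (pvGet? a "Value Date") (pvGetD b "Value Date" "")),
   ("Description", pvGetD a "Description" "" ++ " " ++ pvGetD b "Description" ""),
   ("Debit", "-"),
   ("Credit", if p = 1 then pvGetD a "Credit" "" else pvGetD b "Credit" ""),
   ("Balance", pvGetD b "Balance" "")]

-- stage 1 (Source B's first loop): the mask of greedy merge-start positions, one Bool per index;
-- structural recursion over adjacent pairs carrying start[i-1] as `prev` (false at i = 0),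
-- with the final appended `false` for the last row
def pvStarts (prev : Bool) : List (List (String × String)) → List Bool
  | a :: b :: rest =>
    let s := decide ((pvPat a b ≠ 0) ∧ prev = false)
    s :: pvStarts s (b :: rest)
  | _ => [false]

-- stage 2 (Source B's second loop): emit one row per index — the merged pair if start[i],
-- nothing if start[i-1] (= `prev`), otherwise the row itself
def pvEmit (prev : Bool) : List (List (String × String)) → List Bool → List (List (String × String))
  | [], _ => []
  | e :: rest, starts =>
    let s := starts.headD false
    let tail := pvEmit s rest starts.tail
    if s then pvMerge e (rest.headD []) (pvPat e (rest.headD [])) :: tail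
    else if prev then tail
    else e :: tail

def clean_sbi_entries_alt (entries : List (List (String × String))) : List (List (String × String)) :=
  pvEmit false entries (pvStarts false entries)

-- ===== PRECONDITION & SPEC =====
def Spec_clean_sbi_entries (entries : List (List (String × String))) (out : List (List (String × String))) : Prop := out = clean_sbi_entries_alt entries
instance (entries : List (List (String × String))) (out : List (List (String × String))) : Decidable (Spec_clean_sbi_entries entries out) := by unfold Spec_clean_sbi_entries; infer_instance

-- ===== CLAIM (what is proved, stated in full; the proofs are below) =====
def Claim_equal_clean_sbi_entries : Prop := ∀ (entries : List (List (String × String))), Dom_clean_sbi_entries entries → Spec_clean_sbi_entries entries (clean_sbi_entries entries)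

-- ===== LEMMAS AND PROOFS =====

-- one-step unfoldings of the emit pass
theorem pvEmit_cons_true (prev : Bool) (e : List (String × String))
    (rest : List (List (String × String))) (S : List Bool) :
    pvEmit prev (e :: rest) (true :: S) =
      pvMerge e (rest.headD []) (pvPat e (rest.headD [])) :: pvEmit true rest S := by
  simp [pvEmit]

theorem pvEmit_cons_false (e : List (String × String))
    (rest : List (List (String × String))) (S : List Bool) :
    pvEmit false (e :: rest) (false :: S) = e :: pvEmit false rest S := by
  simp [pvEmit]

-- after a merge at index i, index i+1 carries prev = true: its own start bit is forced to false
-- and the emit pass skips it, so the run continues exactly as a fresh run on the remaining rows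
theorem pv_skip (b : List (String × String)) (rest : List (List (String × String))) :
    pvEmit true (b :: rest) (pvStarts true (b :: rest)) =
      pvEmit false rest (pvStarts false rest) := by
  cases rest with
  | nil => simp [pvStarts, pvEmit]
  | cons c r => simp [pvStarts, pvEmit]

-- main equivalence, by A's own recursion pattern
theorem pv_main (entries : List (List (String × String))) :
    clean_sbi_entries entries = pvEmit false entries (pvStarts false entries) := by
  induction entries using clean_sbi_entries.induct with
  | case1 => simp [clean_sbi_entries, pvEmit]
  | case2 current => simp [clean_sbi_entries, pvStarts, pvEmit]
  | case3 current next_entry rest h1 ih =>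
    -- Case 1 merge: pvPat = 1, start bit true, emit the merged row then skip next_entry
    have hp : pvPat current next_entry = 1 := by simp [pvPat, h1]
    have hs : pvStarts false (current :: next_entry :: rest) =
        true :: pvStarts true (next_entry :: rest) := by simp [pvStarts, hp]
    rw [clean_sbi_entries, if_pos h1, hs, pvEmit_cons_true, pv_skip, ← ih]
    simp [pvMerge, hp]
  | case4 current next_entry rest h1 h2 ih =>
    -- Case 2 merge: pvPat = 2
    have hp : pvPat current next_entry = 2 := by simp [pvPat, h2]
    have hs : pvStarts false (current :: next_entry :: rest) =
        true :: pvStarts true (next_entry :: rest) := by simp [pvStarts, hp]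
    rw [clean_sbi_entries, if_neg h1, if_pos h2, hs, pvEmit_cons_true, pv_skip, ← ih]
    simp [pvMerge, hp]
  | case5 current next_entry rest h1 h2 ih =>
    -- no merge: pvPat = 0, keep the row
    have hp : pvPat current next_entry = 0 := by simp [pvPat, h1, h2]
    have hs : pvStarts false (current :: next_entry :: rest) =
        false :: pvStarts false (next_entry :: rest) := by simp [pvStarts, hp]
    rw [clean_sbi_entries, if_neg h1, if_neg h2, hs, pvEmit_cons_false, ← ih]

-- ===== VERDICT (by name: the statement is the Claim_ definition above) =====
theorem clean_sbi_entries_spec : Claim_equal_clean_sbi_entries := by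
  intro entries _
  unfold Spec_clean_sbi_entries clean_sbi_entries_alt
  exact pv_main entries
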